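-- pv_equiv track=rewrite | github.com/Sup3Legacy/pyVortaro | vortoParser.py | checkRadical
-- ===== SOURCE A (Python) =====
-- def checkRadical(word):
--     assert word[0] == '\''
--     radics = []
--     taille = 0
--     i = 0
--     while i < len(word):
--         if word[i] == '\'':
--             radics.append("")
--             taille += 1
--         elif word[i] == '_':
--             radics.pop()
--             i = len(word) - 1
--             break
--         else:
--             radics[-1] += word[i]
--             taille += 1
--         i += 1
--     if word[len(word) - 1] != '\'' and i == len(word):
--         taille -= len(radics[-1])
--         radics.pop()
--     return (radics, taille)
-- ===== SOURCE B (Python) =====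
-- def checkRadical(word):
--     assert word[0] == "'"
--     p = word.find('_')
--     if p != -1:
--         radics = word[:p].split("'")[1:]
--         radics.pop()
--         return (radics, p)
--     radics = word.split("'")[1:]
--     if word.endswith("'"):
--         return (radics, len(word))
--     tail = radics.pop()
--     return (radics, len(word) - len(tail))
-- ===== Notes on version B (the rewrite author's own statement) =====
-- stated objective: idiomatic
-- what changed: replaces the char-by-char state machine (append/extend/pop with running counters) by a find-the-underscore + split-on-quotes + adjust pass over whole segments; Pre_ excludes words that are empty or do not start with a quote, on which A raises (IndexError/AssertionError).
import Mathlib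
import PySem

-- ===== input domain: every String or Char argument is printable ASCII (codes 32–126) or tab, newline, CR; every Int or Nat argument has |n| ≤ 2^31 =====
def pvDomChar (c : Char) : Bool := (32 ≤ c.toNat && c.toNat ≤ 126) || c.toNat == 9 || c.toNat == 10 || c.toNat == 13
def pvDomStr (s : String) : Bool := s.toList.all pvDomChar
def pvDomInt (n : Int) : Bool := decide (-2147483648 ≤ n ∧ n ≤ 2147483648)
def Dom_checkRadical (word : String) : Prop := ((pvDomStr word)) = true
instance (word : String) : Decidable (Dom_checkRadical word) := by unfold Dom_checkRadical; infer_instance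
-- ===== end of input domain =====

-- B replaces A's char-by-char state machine by an idiomatic find/split/adjust pass over whole
-- segments; Pre_ excludes the inputs (empty word / word not starting with a quote) on which A raises.


-- ===== PORT A =====
-- radics[-1] += c  (Python raises IndexError on an empty list; unreachable under Pre_)
def pvPushLast (radics : List (List Char)) (c : Char) : List (List Char) :=
  radics.dropLast ++ [radics.getLastD [] ++ [c]]

-- the while loop; state (radics, taille, i); the '_' branch performs pop, i = len-1, break
def pvLoopA (n : Nat) : List Char → List (List Char) → Int → Nat → List (List Char) × Int × Nat
  | [], radics, taille, i => (radics, taille, i)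
  | c :: rest, radics, taille, i =>
    if c = '\'' then pvLoopA n rest (radics ++ [[]]) (taille + 1) (i + 1)
    else if c = '_' then (radics.dropLast, taille, n - 1)
    else pvLoopA n rest (pvPushLast radics c) (taille + 1) (i + 1)

def checkRadical (word : String) : List String × Int :=
  let cs := word.toList
  let n := cs.length
  let res := pvLoopA n cs [] 0 0
  let radics := res.1
  let taille := res.2.1
  let i := res.2.2
  if PySem.List.pyGet? cs ((n : Int) - 1) ≠ some '\'' ∧ i = n then
    ((radics.dropLast).map String.ofList, taille - (radics.getLastD []).length)
  else (radics.map String.ofList, taille)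

-- ===== PORT B =====
-- word.find('_'); word[:p]; .split("'") ported as List.splitOn; [1:] is .tail; .pop() drops the last
def checkRadical_alt (word : String) : List String × Int :=
  let cs := word.toList
  let p := PySem.Chars.find cs ['_']
  if p ≠ -1 then
    let radics := ((PySem.List.slice cs none (some p)).splitOn '\'').tail
    ((radics.dropLast).map String.ofList, p)
  else
    let radics := (cs.splitOn '\'').tail
    if PySem.Chars.endswith cs ['\''] then (radics.map String.ofList, (cs.length : Int))
    else
      let t := radics.getLastD []
      ((radics.dropLast).map String.ofList, (cs.length : Int) - t.length)

-- ===== PRECONDITION & SPEC =====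
-- Pre_ excludes exactly the inputs on which A raises: the empty word (IndexError at word[0])
-- and words whose first character is not a quote (AssertionError).
def Pre_checkRadical (word : String) : Prop := PySem.Str.pyGet? word 0 = some '\''
instance (word : String) : Decidable (Pre_checkRadical word) := by unfold Pre_checkRadical; infer_instance
def pvWitness_checkRadical : String := "'ab'c"
def Spec_checkRadical (word : String) (out : List String × Int) : Prop := out = checkRadical_alt word
instance (word : String) (out : List String × Int) : Decidable (Spec_checkRadical word out) := by unfold Spec_checkRadical; infer_instance

-- ===== CLAIM (what is proved, stated in full; the proofs are below) =====
def Claim_equal_checkRadical : Prop := ∀ (word : String), Dom_checkRadical word → Pre_checkRadical word → Spec_checkRadical word (checkRadical word)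

-- ===== LEMMAS AND PROOFS =====

lemma pvSplitOn_cons (x : Char) (xs : List Char) :
    (x :: xs).splitOn '\'' =
      if x = '\'' then [] :: xs.splitOn '\'' else (xs.splitOn '\'').modifyHead (x :: ·) := by
  simp [List.splitOn, List.splitOnP_cons]

lemma pvSplitOn_ne_nil (xs : List Char) : xs.splitOn '\'' ≠ [] :=
  List.splitOnP_ne_nil _ _

-- [a] is a prefix of l iff l starts with a
lemma pvSingletonPrefix {α : Type} (a : α) (l : List α) : [a] <+: l ↔ l.head? = some a := by
  cases l with
  | nil => simp
  | cons b t => simp [List.cons_prefix_cons, eq_comm]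

-- first-occurrence decomposition
lemma pvFirstSplit {α : Type} (a : α) (l : List α) (h : a ∈ l) :
    ∃ pre rest, l = pre ++ a :: rest ∧ a ∉ pre := by
  induction l with
  | nil => cases h
  | cons b t ih =>
    by_cases hb : b = a
    · exact ⟨[], t, by simp [hb], by simp⟩
    · have ht : a ∈ t := by cases h with
        | head => exact absurd rfl hb
        | tail _ h' => exact h'
      obtain ⟨pre, rest, hE, hN⟩ := ih ht
      refine ⟨b :: pre, rest, by simp [hE], ?_⟩
      intro hmem
      rcases List.mem_cons.mp hmem with h' | h'
      · exact hb h'.symm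
      · exact hN h'

-- the loop on a segment without '_' : splits the segment on quotes, merging its first piece
-- into the currently open radical
lemma pvLoopA_no_us (cs : List Char) (h : '_' ∉ cs) (n : Nat) (R : List (List Char))
    (r : List Char) (t : Int) (i : Nat) :
    pvLoopA n cs (R ++ [r]) t i =
      (R ++ (cs.splitOn '\'').modifyHead (r ++ ·), t + cs.length, i + cs.length) := by
  induction cs generalizing R r t i with
  | nil => simp [pvLoopA, List.splitOn_nil]
  | cons c rest ih =>
    have hc : c ≠ '_' := fun hc => h (hc ▸ List.mem_cons_self)
    have hrest : '_' ∉ rest := fun h' => h (List.mem_cons_of_mem _ h')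
    obtain ⟨S0, St, hS⟩ := List.exists_cons_of_ne_nil (pvSplitOn_ne_nil rest)
    by_cases hq : c = '\''
    · subst hq
      rw [show pvLoopA n ('\'' :: rest) (R ++ [r]) t i
            = pvLoopA n rest ((R ++ [r]) ++ [[]]) (t + 1) (i + 1) by simp [pvLoopA]]
      rw [ih hrest]
      rw [pvSplitOn_cons]
      simp only [hS, List.modifyHead_cons, Prod.mk.injEq]
      refine ⟨by simp, by simp [List.length_cons]; ring, by simp [List.length_cons]; omega⟩
    · rw [show pvLoopA n (c :: rest) (R ++ [r]) t i
            = pvLoopA n rest (pvPushLast (R ++ [r]) c) (t + 1) (i + 1) by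
          simp [pvLoopA, hq, hc]]
      have hpush : pvPushLast (R ++ [r]) c = R ++ [r ++ [c]] := by
        simp [pvPushLast]
      rw [hpush, ih hrest]
      rw [pvSplitOn_cons]
      simp only [if_neg hq, hS, List.modifyHead_cons, Prod.mk.injEq]
      refine ⟨by simp, by simp [List.length_cons]; ring, by simp [List.length_cons]; omega⟩

-- the loop when the remaining input is pre ++ '_' :: rest with no '_' in pre
lemma pvLoopA_us (pre : List Char) (h : '_' ∉ pre) (rest : List Char) (n : Nat)
    (R : List (List Char)) (r : List Char) (t : Int) (i : Nat) :
    pvLoopA n (pre ++ '_' :: rest) (R ++ [r]) t i =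
      ((R ++ (pre.splitOn '\'').modifyHead (r ++ ·)).dropLast, t + pre.length, n - 1) := by
  induction pre generalizing R r t i with
  | nil => simp [pvLoopA, List.splitOn_nil]
  | cons c pre' ih =>
    have hc : c ≠ '_' := fun hc => h (hc ▸ List.mem_cons_self)
    have hpre : '_' ∉ pre' := fun h' => h (List.mem_cons_of_mem _ h')
    obtain ⟨S0, St, hS⟩ := List.exists_cons_of_ne_nil (pvSplitOn_ne_nil pre')
    by_cases hq : c = '\''
    · subst hq
      rw [show pvLoopA n (('\'' :: pre') ++ '_' :: rest) (R ++ [r]) t i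
            = pvLoopA n (pre' ++ '_' :: rest) ((R ++ [r]) ++ [[]]) (t + 1) (i + 1) by
          simp [pvLoopA]]
      rw [ih hpre]
      rw [pvSplitOn_cons]
      simp only [hS, List.modifyHead_cons, Prod.mk.injEq]
      refine ⟨by simp, by simp [List.length_cons]; ring, trivial⟩
    · rw [show pvLoopA n ((c :: pre') ++ '_' :: rest) (R ++ [r]) t i
            = pvLoopA n (pre' ++ '_' :: rest) (pvPushLast (R ++ [r]) c) (t + 1) (i + 1) by
          simp [pvLoopA, hq, hc]]
      have hpush : pvPushLast (R ++ [r]) c = R ++ [r ++ [c]] := by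
        simp [pvPushLast]
      rw [hpush, ih hpre]
      rw [pvSplitOn_cons]
      simp only [if_neg hq, hS, List.modifyHead_cons, Prod.mk.injEq]
      refine ⟨by simp, by simp [List.length_cons]; ring, trivial⟩

-- Python str.find of '_' when '_' is absent
lemma pvFind_none (cs : List Char) (h : '_' ∉ cs) : PySem.Chars.find cs ['_'] = -1 := by
  rw [PySem.Chars.find_eq_neg_one_iff]
  intro hinf
  exact h (hinf.sublist.subset (by simp))

-- Python str.find of '_' returns the index of its FIRST occurrence
lemma pvFind_first (pre rest : List Char) (h : '_' ∉ pre) :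
    PySem.Chars.find (pre ++ '_' :: rest) ['_'] = (pre.length : Int) := by
  have hne : PySem.Chars.find (pre ++ '_' :: rest) ['_'] ≠ -1 := by
    intro hEq
    rw [PySem.Chars.find_eq_neg_one_iff] at hEq
    exact hEq ⟨pre, rest, by simp⟩
  have h0 : PySem.Chars.findFrom (pre ++ '_' :: rest) ['_'] 0 none
      = PySem.Chars.find (pre ++ '_' :: rest) ['_'] := PySem.Chars.findFrom_zero _ _
  have hspec := PySem.Chars.findFrom_natCast_spec (pre ++ '_' :: rest) ['_'] 0 (by simp)
    (by rw [Nat.cast_zero, h0]; exact hne)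
  rw [Nat.cast_zero, h0] at hspec
  obtain ⟨hle, hpref, hmin⟩ := hspec
  set f := (PySem.Chars.find (pre ++ '_' :: rest) ['_']).toNat with hf
  have hat : ((pre ++ '_' :: rest).drop f).head? = some '_' := (pvSingletonPrefix _ _).mp hpref
  have hfle : f ≤ pre.length := by
    by_contra hgt
    rw [Nat.not_le] at hgt
    have := hmin pre.length (Nat.zero_le _) hgt
    exact this ((pvSingletonPrefix _ _).mpr (by simp))
  have hfeq : f = pre.length := by
    rcases Nat.lt_or_ge f pre.length with hlt | hge
    · exfalso
      rw [List.head?_drop] at hat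
      rw [List.getElem?_append_left hlt] at hat
      have : pre[f]? = some '_' := hat
      have hmem : '_' ∈ pre := by
        have := List.getElem?_eq_some_iff.mp this
        obtain ⟨hh, he⟩ := this
        exact he ▸ List.getElem_mem _
      exact h hmem
    · omega
  omega

-- word[len-1] vs endswith
lemma pvLast_endswith (cs : List Char) (hne : cs ≠ []) (c : Char) :
    (PySem.List.pyGet? cs ((cs.length : Int) - 1) = some c ↔ PySem.Chars.endswith cs [c] = true) := by
  have hlen : 1 ≤ cs.length := List.length_pos_iff.mpr hne
  have hcast : ((cs.length : Int) - 1) = ((cs.length - 1 : Nat) : Int) := by omega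
  rw [hcast, PySem.List.pyGet?_natCast, PySem.Chars.endswith_iff]
  rw [← List.getLast?_eq_getElem?]
  constructor
  · intro hg
    obtain ⟨l', hl'⟩ := List.getLast?_eq_some_iff.mp hg
    exact ⟨l', hl'.symm⟩
  · rintro ⟨l', hl'⟩
    exact List.getLast?_eq_some_iff.mpr ⟨l', hl'.symm⟩

lemma pvNotMemQuote (l : List Char) (h : '_' ∉ l) : '_' ∉ '\'' :: l := by
  intro hm
  rcases List.mem_cons.mp hm with h' | h'
  · exact absurd h' (by decide)
  · exact h h'

-- ===== VERDICT (by name: the statement is the Claim_ definition above) =====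
theorem checkRadical_spec : Claim_equal_checkRadical := by
  intro word _ hpre
  unfold Spec_checkRadical
  unfold Pre_checkRadical at hpre
  have hpre' : word.toList.head? = some '\'' := by
    simp only [pysem] at hpre
    simpa [PySem.List.pyGet?, PySem.List.pyIdx?, List.head?_eq_getElem?] using hpre
  obtain ⟨rest, hcs⟩ : ∃ rest, word.toList = '\'' :: rest := by
    cases h : word.toList with
    | nil => rw [h] at hpre'; simp at hpre'
    | cons c t => rw [h] at hpre'; simp at hpre'; exact ⟨t, by rw [hpre']⟩
  simp only [checkRadical, checkRadical_alt, hcs]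
  by_cases hu : '_' ∈ rest
  · -- an underscore is present: A breaks out of the loop, B cuts at word.find('_')
    obtain ⟨pre, rest2, hre, hnp⟩ := pvFirstSplit '_' rest hu
    subst hre
    obtain ⟨P0, Pt, hP⟩ := List.exists_cons_of_ne_nil (pvSplitOn_ne_nil pre)
    have hfind : PySem.Chars.find ('\'' :: (pre ++ '_' :: rest2)) ['_']
        = ((pre.length + 1 : Nat) : Int) := by
      have := pvFind_first ('\'' :: pre) rest2 (pvNotMemQuote pre hnp)
      simpa using this
    have hloop : pvLoopA ('\'' :: (pre ++ '_' :: rest2)).length ('\'' :: (pre ++ '_' :: rest2)) [] 0 0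
        = ((P0 :: Pt).dropLast, 1 + (pre.length : Int),
           ('\'' :: (pre ++ '_' :: rest2)).length - 1) := by
      have h1 : pvLoopA ('\'' :: (pre ++ '_' :: rest2)).length ('\'' :: (pre ++ '_' :: rest2)) [] 0 0
          = pvLoopA ('\'' :: (pre ++ '_' :: rest2)).length (pre ++ '_' :: rest2) ([] ++ [[]]) (0 + 1) (0 + 1) := by
        simp [pvLoopA]
      rw [h1, pvLoopA_us pre hnp rest2 _ [] [] (0 + 1) (0 + 1), hP]
      simp
    rw [hloop, hfind]
    -- A's trim condition cannot fire: its i = n half is contradictory (i = n - 1 < n)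
    rw [if_neg (by
      intro hc
      have hx : ('\'' :: (pre ++ '_' :: rest2)).length - 1 = ('\'' :: (pre ++ '_' :: rest2)).length := hc.2
      simp only [List.length_cons, List.length_append] at hx
      omega)]
    rw [if_pos (show ((pre.length + 1 : Nat) : Int) ≠ -1 by push_cast; omega)]
    dsimp only
    rw [PySem.List.slice_to_natCast]
    have htake : ('\'' :: (pre ++ '_' :: rest2)).take (pre.length + 1) = '\'' :: pre := by
      simp [List.take_succ_cons]
    rw [htake, pvSplitOn_cons, if_pos rfl, hP]
    simp only [List.tail_cons, Prod.mk.injEq]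
    refine ⟨by trivial, by push_cast; ring⟩
  · -- no underscore: A runs the loop to the end, B splits the whole word on quotes
    obtain ⟨S0, St, hS⟩ := List.exists_cons_of_ne_nil (pvSplitOn_ne_nil rest)
    have hfind : PySem.Chars.find ('\'' :: rest) ['_'] = -1 :=
      pvFind_none _ (pvNotMemQuote rest hu)
    have hloop : pvLoopA ('\'' :: rest).length ('\'' :: rest) [] 0 0
        = (S0 :: St, 1 + (rest.length : Int), 1 + rest.length) := by
      have h1 : pvLoopA ('\'' :: rest).length ('\'' :: rest) [] 0 0
          = pvLoopA ('\'' :: rest).length rest ([] ++ [[]]) (0 + 1) (0 + 1) := by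
        simp [pvLoopA]
      rw [h1, pvLoopA_no_us rest hu _ [] [] (0 + 1) (0 + 1), hS]
      simp
    have hsplit : ('\'' :: rest).splitOn '\'' = [] :: S0 :: St := by
      rw [pvSplitOn_cons, if_pos rfl, hS]
    rw [hloop, hfind]
    by_cases hend : PySem.Chars.endswith ('\'' :: rest) ['\''] = true
    · -- the word ends with a quote: neither side trims
      rw [if_neg (fun hc => hc.1 ((pvLast_endswith ('\'' :: rest) (by simp) '\'').mpr hend))]
      rw [if_neg (not_not_intro rfl), if_pos hend]
      dsimp only
      rw [hsplit]
      simp only [List.tail_cons, Prod.mk.injEq]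
      refine ⟨by trivial, by simp only [List.length_cons]; push_cast; ring⟩
    · -- the word does not end with a quote: A trims the incomplete segment, B pops it
      rw [if_pos (⟨fun hg => hend ((pvLast_endswith ('\'' :: rest) (by simp) '\'').mp hg),
        by show 1 + rest.length = ('\'' :: rest).length; simp only [List.length_cons]; omega⟩ :
          _ ∧ _)]
      rw [if_neg (not_not_intro rfl), if_neg hend]
      dsimp only
      rw [hsplit]
      simp only [List.tail_cons, Prod.mk.injEq]
      refine ⟨by trivial, by simp only [List.length_cons]; push_cast; ring⟩
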